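-- pv_equiv track=rewrite | github.com/JudsonAbhishek/Gfg_codes | Difficulty: Basic/Front-Back Transformation - copy/front-back-transformation-copy.py | convert
-- ===== SOURCE A (Python) =====
-- def convert(s):
--     temp=""
--     for i in s:
--         if i.isupper():
--             temp+=chr(ord('A') +(ord("Z")-ord(i)))
--         else:
--             temp+=chr(ord('a') +(ord("z")-ord(i)))
--     return temp
-- ===== SOURCE B (Python) =====
-- def convert(s):
--     if not s:
--         return ""
--     if len(s) == 1:
--         return chr(219 - ord(s) - (64 if s.isupper() else 0))
--     mid = len(s) // 2
--     return convert(s[:mid]) + convert(s[mid:])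
-- ===== Notes on version B (the rewrite author's own statement) =====
-- stated objective: alternative
-- what changed: Replaces A's iterative accumulating loop with an if/else per character by a divide-and-conquer recursion that splits the string in halves and mirrors a single character at the base with one arithmetic formula (219 - ord - 64*upper).
import Mathlib
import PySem

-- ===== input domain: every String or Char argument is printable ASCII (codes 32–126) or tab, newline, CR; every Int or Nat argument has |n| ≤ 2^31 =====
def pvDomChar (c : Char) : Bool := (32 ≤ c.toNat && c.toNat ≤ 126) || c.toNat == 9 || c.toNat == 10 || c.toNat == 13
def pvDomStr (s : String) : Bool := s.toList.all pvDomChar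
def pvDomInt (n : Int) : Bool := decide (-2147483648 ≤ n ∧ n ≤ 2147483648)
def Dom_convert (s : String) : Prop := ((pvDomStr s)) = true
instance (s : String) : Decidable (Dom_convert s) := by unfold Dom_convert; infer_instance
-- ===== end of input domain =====

-- B replaces A's accumulating per-character loop by a divide-and-conquer recursion on string
-- halves with one arithmetic mirror formula at the singleton base (objective: alternative).

-- ===== PORT A =====
-- A's per-character expression: chr(ord('A')+(ord('Z')-ord(i))) / chr(ord('a')+(ord('z')-ord(i)))
def convMirrorA (c : Char) : Char :=
  if PySem.Chars.isupper c then Char.ofNat ((65 + (90 - (c.toNat : Int))).toNat)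
  else Char.ofNat ((97 + (122 - (c.toNat : Int))).toNat)

def convert (s : String) : String :=
  String.mk (s.toList.foldl (fun temp i => temp ++ [convMirrorA i]) [])

-- ===== PORT B =====
-- B's base case: chr(219 - ord(s) - (64 if s.isupper() else 0))
def convMirrorB (c : Char) : Char :=
  Char.ofNat ((219 - (c.toNat : Int) - (if PySem.Chars.isupper c then 64 else 0)).toNat)

-- the divide-and-conquer recursion of Source B, on the string's character list
def convRec (l : List Char) : List Char :=
  if _h0 : l.length = 0 then []
  else if _h1 : l.length = 1 then [convMirrorB (l.headD ' ')]
  else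
    convRec (l.take (l.length / 2)) ++ convRec (l.drop (l.length / 2))
termination_by l.length
decreasing_by
  · simp only [List.length_take]; omega
  · simp only [List.length_drop]; omega

def convert_alt (s : String) : String := String.mk (convRec s.toList)

-- ===== PRECONDITION & SPEC =====
def Spec_convert (s : String) (out : String) : Prop := out = convert_alt s
instance (s : String) (out : String) : Decidable (Spec_convert s out) := by unfold Spec_convert; infer_instance

-- ===== CLAIM (what is proved, stated in full; the proofs are below) =====
def Claim_equal_convert : Prop := ∀ (s : String), Dom_convert s → Spec_convert s (convert s)

-- ===== LEMMAS AND PROOFS =====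

-- the two per-character formulas agree: 65+(90-x) = 219-x-64 and 97+(122-x) = 219-x
theorem convMirror_eq (c : Char) : convMirrorA c = convMirrorB c := by
  unfold convMirrorA convMirrorB
  split <;> congr 1 <;> omega

-- A's accumulating loop is the map of the per-character transform
theorem conv_foldl_eq_map (l : List Char) (acc : List Char) :
    l.foldl (fun temp i => temp ++ [convMirrorA i]) acc = acc ++ l.map convMirrorA := by
  induction l generalizing acc with
  | nil => simp
  | cons x xs ih => simp [List.foldl_cons, ih]

-- the divide-and-conquer recursion computes the same map
theorem convRec_eq_map (l : List Char) : convRec l = l.map convMirrorB := by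
  induction l using convRec.induct with
  | case1 l h0 =>
    rw [convRec]
    simp_all [List.length_eq_zero_iff.mp h0]
  | case2 l h0 h1 =>
    rw [convRec]
    obtain ⟨c, rfl⟩ := List.length_eq_one_iff.mp h1
    simp [h1]
  | case3 l h0 h1 ih1 ih2 =>
    rw [convRec]
    simp only [h0, h1, dite_false, ih1, ih2, ← List.map_append, List.take_append_drop]

-- ===== VERDICT (by name: the statement is the Claim_ definition above) =====
theorem convert_spec : Claim_equal_convert := by
  intro s _
  unfold Spec_convert convert convert_alt
  rw [conv_foldl_eq_map, convRec_eq_map, List.nil_append]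
  congr 1
  exact List.map_congr_left fun c _ => convMirror_eq c
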